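-- pv_equiv track=rewrite | github.com/Variante/gpt_paper_assistant | push_to_google_chat.py | group_by_topics
-- ===== SOURCE A (Python) =====
-- def group_by_topics(topic_ids: list[int], paper_strings: list[str]) -> list[str]:
--     grouped: dict[int, list[str]] = {}
--     for topic_id, paper in zip(topic_ids, paper_strings):
--         grouped.setdefault(topic_id, []).append(paper)
--
--     sections: list[str] = []
--     for topic_id in sorted(topic for topic in grouped if topic != 0):
--         sections.append(f"<b>Topic {topic_id}: </b>\n" + "\n\n".join(grouped[topic_id]))
--
--     if grouped.get(0):
--         sections.append("<b>GPT thinks you might like: </b>\n" + "\n\n".join(grouped[0]))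
--
--     return sections
-- ===== SOURCE B (Python) =====
-- def group_by_topics(topic_ids: list[int], paper_strings: list[str]) -> list[str]:
--     pairs = list(zip(topic_ids, paper_strings))
--     nonzero = [(t, i, p) for i, (t, p) in enumerate(pairs) if t != 0]
--     nonzero.sort(key=lambda x: (x[0], x[1]))
--     sections = []
--     i, n = 0, len(nonzero)
--     while i < n:
--         t = nonzero[i][0]
--         j = i
--         while j < n and nonzero[j][0] == t:
--             j += 1
--         sections.append(f"<b>Topic {t}: </b>\n" + "\n\n".join(x[2] for x in nonzero[i:j]))
--         i = j
--     zeros = [p for t, p in pairs if t == 0]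
--     if zeros:
--         sections.append("<b>GPT thinks you might like: </b>\n" + "\n\n".join(zeros))
--     return sections
-- ===== Notes on version B (the rewrite author's own statement) =====
-- stated objective: alternative
-- what changed: B replaces A's dict-of-lists grouping with decorate-sort-undecorate: it tags non-zero (topic, paper) pairs with their index, sorts once by (topic, index), emits one section per contiguous run of equal topics, and builds the topic-0 section by a plain filter.
import Mathlib
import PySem

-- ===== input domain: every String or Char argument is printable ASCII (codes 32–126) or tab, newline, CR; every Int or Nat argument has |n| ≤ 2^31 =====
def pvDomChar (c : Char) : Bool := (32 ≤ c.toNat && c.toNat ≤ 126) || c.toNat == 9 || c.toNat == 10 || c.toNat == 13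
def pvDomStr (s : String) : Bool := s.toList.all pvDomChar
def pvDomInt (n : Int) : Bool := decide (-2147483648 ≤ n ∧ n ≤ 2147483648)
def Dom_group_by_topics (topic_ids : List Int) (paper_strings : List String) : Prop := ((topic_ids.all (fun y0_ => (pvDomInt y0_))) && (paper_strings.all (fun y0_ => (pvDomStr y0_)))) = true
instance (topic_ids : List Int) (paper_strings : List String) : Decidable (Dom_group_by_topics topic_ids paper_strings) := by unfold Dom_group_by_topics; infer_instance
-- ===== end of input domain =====

-- B drops A's dict-of-lists: it decorates the non-zero (topic, paper) pairs with their index, sorts once by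
-- (topic, index), emits one section per contiguous run, and handles topic 0 by a separate filter (alternative decomposition).

-- ===== PORT A =====
-- grouped.setdefault(t, []).append(p)  ==  grouped[t] = grouped.get(t, []) + [p]  ==  Dict.modify t [] (· ++ [p])
def group_by_topics (topic_ids : List Int) (paper_strings : List String) : List String :=
  let grouped : PySem.Dict Int (List String) :=
    (topic_ids.zip paper_strings).foldl (fun d p => d.modify p.1 [] (· ++ [p.2])) PySem.Dict.empty
  let sections : List String :=
    (PySem.List.sorted (grouped.keys.filter (fun t => t ≠ 0)) (fun x => x) false).map
      (fun t => "<b>Topic " ++ PySem.Int.toStr t ++ ": </b>\n" ++ PySem.Str.join "\n\n" (grouped.getD t []))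
  match grouped.get? 0 with
  | some l => if l.isEmpty then sections
              else sections ++ ["<b>GPT thinks you might like: </b>\n" ++ PySem.Str.join "\n\n" l]
  | none => sections

-- ===== PORT B =====
-- the two nested while loops of Source B: emit the section of the first run, recurse on the rest
def pvRuns : List (Int × Int × String) → List String
  | [] => []
  | x :: rest =>
      ("<b>Topic " ++ PySem.Int.toStr x.1 ++ ": </b>\n" ++
        PySem.Str.join "\n\n" (x.2.2 :: (rest.takeWhile (fun y => y.1 == x.1)).map (fun y => y.2.2)))
      :: pvRuns (rest.dropWhile (fun y => y.1 == x.1))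
  termination_by l => l.length
  decreasing_by simpa using Nat.lt_succ_of_le (List.length_dropWhile_le _ _)

def group_by_topics_alt (topic_ids : List Int) (paper_strings : List String) : List String :=
  let pairs := topic_ids.zip paper_strings
  let nonzero := ((PySem.List.enumerate pairs 0).filter (fun x => x.2.1 ≠ 0)).map
    (fun x => (x.2.1, x.1, x.2.2))
  let nzsorted := PySem.List.sorted2 nonzero (fun x => x.1) (fun x => x.2.1) false
  let sections := pvRuns nzsorted
  let zeros := (pairs.filter (fun p => p.1 == 0)).map (fun p => p.2)
  if zeros.isEmpty then sections
  else sections ++ ["<b>GPT thinks you might like: </b>\n" ++ PySem.Str.join "\n\n" zeros]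

-- ===== PRECONDITION & SPEC =====
def Spec_group_by_topics (topic_ids : List Int) (paper_strings : List String) (out : List String) : Prop := out = group_by_topics_alt topic_ids paper_strings
instance (topic_ids : List Int) (paper_strings : List String) (out : List String) : Decidable (Spec_group_by_topics topic_ids paper_strings out) := by unfold Spec_group_by_topics; infer_instance

-- ===== CLAIM (what is proved, stated in full; the proofs are below) =====
def Claim_equal_group_by_topics : Prop := ∀ (topic_ids : List Int) (paper_strings : List String), Dom_group_by_topics topic_ids paper_strings → Spec_group_by_topics topic_ids paper_strings (group_by_topics topic_ids paper_strings)

-- ===== LEMMAS AND PROOFS =====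

-- sorted2 with keys (k1, k2) is sorted with the lexicographic key (the comparators are equal functions)
theorem pv_sorted2_eq_sorted_lex (xs : List (Int × Int × String)) :
    PySem.List.sorted2 xs (fun x => x.1) (fun x => x.2.1) false
      = PySem.List.sorted xs (fun x => toLex (x.1, x.2.1)) false := by
  rw [PySem.List.sorted_eq_foldl_insertBy]
  show xs.foldl (fun acc x => PySem.List.insertBy
      (fun a b => decide (a.1 < b.1) || (!decide (b.1 < a.1) && decide (a.2.1 < b.2.1))) x acc) [] = _
  have hcmp : (fun (a b : Int × Int × String) =>
        decide (a.1 < b.1) || (!decide (b.1 < a.1) && decide (a.2.1 < b.2.1)))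
      = fun a b => decide ((toLex (a.1, a.2.1)) < toLex (b.1, b.2.1)) := by
    funext a b
    by_cases h1 : a.1 < b.1 <;> by_cases h2 : b.1 < a.1 <;> by_cases h3 : a.2.1 < b.2.1 <;>
      simp [h1, h2, h3, Prod.Lex.lt_iff] <;> omega
  rw [hcmp]

-- takeWhile / dropWhile over a run followed by elements that fail the predicate
theorem pv_takeWhile_part {α : Type} (p : α → Bool) (u v : List α)
    (hu : ∀ y ∈ u, p y = true) (hv : ∀ y ∈ v, p y = false) :
    (u ++ v).takeWhile p = u ∧ (u ++ v).dropWhile p = v := by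
  induction u with
  | nil =>
      cases v with
      | nil => simp
      | cons z zs => simp [hv z (by simp)]
  | cons a u ih =>
      have ha := hu a (by simp)
      have := ih (fun y hy => hu y (by simp [hy]))
      simp [ha, this.1, this.2]

-- pvRuns over a flatMap of nonempty single-topic buckets with strictly increasing topics
theorem pv_runs_flatMap (nz : List (Int × Int × String)) (ts : List Int)
    (hts : ts.Pairwise (· < ·))
    (hne : ∀ t ∈ ts, nz.filter (fun x => x.1 == t) ≠ []) :
    pvRuns (ts.flatMap (fun t => nz.filter (fun x => x.1 == t)))
      = ts.map (fun t => "<b>Topic " ++ PySem.Int.toStr t ++ ": </b>\n" ++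
          PySem.Str.join "\n\n" ((nz.filter (fun x => x.1 == t)).map (fun y => y.2.2))) := by
  induction ts with
  | nil => simp [pvRuns]
  | cons t ts ih =>
      obtain ⟨x, tl, hb⟩ : ∃ x tl, nz.filter (fun x => x.1 == t) = x :: tl := by
        rcases h : nz.filter (fun x => x.1 == t) with _ | ⟨x, tl⟩
        · exact absurd h (hne t (by simp))
        · exact ⟨x, tl, h⟩
      have hx1 : x.1 = t := by
        have : x ∈ nz.filter (fun x => x.1 == t) := by rw [hb]; simp
        simpa using (List.mem_filter.1 this).2
      have htl : ∀ y ∈ tl, (y.1 == x.1) = true := by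
        intro y hy
        have : y ∈ nz.filter (fun x => x.1 == t) := by rw [hb]; simp [hy]
        have := (List.mem_filter.1 this).2
        simp only [beq_iff_eq] at this ⊢
        rw [this, hx1]
      have hrest : ∀ y ∈ ts.flatMap (fun t' => nz.filter (fun x => x.1 == t')), (y.1 == x.1) = false := by
        intro y hy
        obtain ⟨t', ht', hyt'⟩ := List.mem_flatMap.1 hy
        have hy1 : y.1 = t' := by simpa using (List.mem_filter.1 hyt').2
        have : t < t' := (List.pairwise_cons.1 hts).1 t' ht'
        simp only [beq_eq_false_iff_ne, ne_eq, hy1, hx1]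
        omega
      have hpart := pv_takeWhile_part (fun y => y.1 == x.1)
        tl (ts.flatMap (fun t' => nz.filter (fun x => x.1 == t'))) htl hrest
      have hflat : (t :: ts).flatMap (fun t' => nz.filter (fun x => x.1 == t'))
          = x :: (tl ++ ts.flatMap (fun t' => nz.filter (fun x => x.1 == t'))) := by
        simp [List.flatMap_cons, hb]
      rw [hflat, pvRuns, hpart.1, hpart.2,
        ih (List.pairwise_cons.1 hts).2 (fun t' ht' => hne t' (by simp [ht']))]
      simp [hb, hx1]


-- papers of a fixed non-zero topic, read off the decorated list, are the papers of that topic in order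
theorem pv_bucket (t : Int) (ht : t ≠ 0) :
    ∀ (pairs : List (Int × String)) (s : Int),
      ((((PySem.List.enumerate pairs s).filter (fun x => x.2.1 ≠ 0)).map
          (fun x => (x.2.1, x.1, x.2.2))).filter (fun y => y.1 == t)).map (fun y => y.2.2)
        = (pairs.filter (fun p => p.1 == t)).map (fun p => p.2) := by
  intro pairs
  induction pairs with
  | nil => intro s; simp [PySem.List.enumerate_nil]
  | cons hd tl ih =>
      intro s
      have hih := ih (s + 1)
      simp only [ne_eq, decide_not] at hih
      rw [PySem.List.enumerate_cons]
      by_cases h0 : hd.1 = 0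
      · simp [h0, Ne.symm ht, hih]
      · by_cases het : hd.1 = t
        · simp [het, ht, hih]
        · simp [h0, het, hih]

-- the concatenation of the per-topic buckets is pairwise strictly increasing in the (topic, index) lex key
theorem pv_ys_pairwise (nz : List (Int × Int × String)) (ts : List Int)
    (hts : ts.Pairwise (· < ·)) (hidx : nz.Pairwise (fun a b => a.2.1 < b.2.1)) :
    (ts.flatMap (fun t => nz.filter (fun x => x.1 == t))).Pairwise
      (fun a b => toLex (a.1, a.2.1) < toLex (b.1, b.2.1)) := by
  induction ts with
  | nil => simp
  | cons t ts ih =>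
      rw [List.flatMap_cons, List.pairwise_append]
      refine ⟨?_, ih (List.pairwise_cons.1 hts).2, ?_⟩
      · refine List.Pairwise.imp_of_mem ?_ (hidx.filter _)
        intro a b ha hb hab
        have ha1 : a.1 = t := by simpa using (List.mem_filter.1 ha).2
        have hb1 : b.1 = t := by simpa using (List.mem_filter.1 hb).2
        simp [Prod.Lex.lt_iff, ha1, hb1, hab]
      · intro a ha b hb
        have ha1 : a.1 = t := by simpa using (List.mem_filter.1 ha).2
        obtain ⟨t', ht', hbt'⟩ := List.mem_flatMap.1 hb
        have hb1 : b.1 = t' := by simpa using (List.mem_filter.1 hbt').2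
        have : t < t' := (List.pairwise_cons.1 hts).1 t' ht'
        simp [Prod.Lex.lt_iff, ha1, hb1, this]

theorem pv_main (topic_ids : List Int) (paper_strings : List String) :
    group_by_topics topic_ids paper_strings = group_by_topics_alt topic_ids paper_strings := by
  unfold group_by_topics group_by_topics_alt
  set pairs := topic_ids.zip paper_strings with hp
  set grouped := pairs.foldl (fun d p => d.modify p.1 [] (· ++ [p.2]))
      (PySem.Dict.empty : PySem.Dict Int (List String)) with hg
  set nonzero := ((PySem.List.enumerate pairs 0).filter (fun x => x.2.1 ≠ 0)).map
      (fun x => (x.2.1, x.1, x.2.2)) with hnz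
  set ts := PySem.List.sorted (grouped.keys.filter (fun t => t ≠ 0)) (fun x => x) false with hts
  -- dict facts
  have hkeys : grouped.keys = PySem.Set.ofList (pairs.map (·.1)) := by
    rw [hg, PySem.Dict.keys_foldl_modify_key]
    simp [PySem.Set.update, PySem.Set.ofList_eq_foldl]
  have hnd : grouped.keys.Nodup :=
    PySem.Dict.nodup_keys_foldl_modify_key pairs Prod.fst [] _ _ PySem.Dict.nodup_keys_empty
  have hget : ∀ t, grouped.getD t [] = (pairs.filter (fun p => p.1 == t)).map (·.2) := by
    intro t; rw [hg, PySem.Dict.getD_foldl_modify_append]; simp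
  -- facts about ts
  have hts_mem : ∀ t, t ∈ ts ↔ (t ≠ 0 ∧ t ∈ pairs.map Prod.fst) := by
    intro t
    rw [hts, PySem.List.mem_sorted, List.mem_filter, hkeys]
    simp [PySem.Set.mem_ofList, and_comm]
  have hts_lt : ts.Pairwise (· < ·) := by
    have h1 : ts.Pairwise (· ≤ ·) := by
      rw [hts]
      exact PySem.List.sorted_pairwise (grouped.keys.filter (fun t => t ≠ 0)) (fun x => x)
    have h2 : ts.Nodup :=
      (PySem.List.sorted_perm (grouped.keys.filter (fun t => t ≠ 0)) (fun x => x) false).nodup_iff.2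
        (hnd.filter _)
    exact (h1.and h2).imp (fun h => lt_of_le_of_ne h.1 h.2)
  -- facts about nonzero
  have hnz_fst : ∀ x ∈ nonzero, x.1 ≠ 0 ∧ (x.1, x.2.2) ∈ pairs := by
    intro x hx
    rw [hnz] at hx
    obtain ⟨e, he, rfl⟩ := List.mem_map.1 hx
    obtain ⟨he1, he2⟩ := List.mem_filter.1 he
    obtain ⟨k, hk, rfl⟩ := (PySem.List.mem_enumerate_iff _ _ _).1 he1
    refine ⟨by simp at he2; exact he2, ?_⟩
    simp
  have hidx : nonzero.Pairwise (fun a b => a.2.1 < b.2.1) := by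
    rw [hnz, List.pairwise_map]
    exact (PySem.List.pairwise_lt_enumerate pairs 0).filter _
  -- the sorted decorated list is the concatenation of per-topic buckets
  have hbucket_ne : ∀ t ∈ ts, nonzero.filter (fun x => x.1 == t) ≠ [] := by
    intro t htmem
    obtain ⟨ht0, htp⟩ := (hts_mem t).1 htmem
    obtain ⟨q, hq, hq1⟩ := List.mem_map.1 htp
    obtain ⟨k, hk, rfl⟩ := List.mem_iff_getElem.1 hq
    have hxmem : (pairs[k].1, (k : Int), pairs[k].2) ∈ nonzero := by
      rw [hnz]
      refine List.mem_map.2 ⟨((k : Int), pairs[k]), ?_, rfl⟩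
      refine List.mem_filter.2 ⟨?_, by simp [hq1, ht0]⟩
      exact (PySem.List.mem_enumerate_iff _ _ _).2 ⟨k, hk, by simp⟩
    refine List.ne_nil_of_mem (a := (pairs[k].1, (k : Int), pairs[k].2)) ?_
    exact List.mem_filter.2 ⟨hxmem, by simp [hq1]⟩
  have hys_perm : (ts.flatMap (fun t => nonzero.filter (fun x => x.1 == t))).Perm nonzero := by
    have hys_pw := pv_ys_pairwise nonzero ts hts_lt hidx
    have hys_nd : (ts.flatMap (fun t => nonzero.filter (fun x => x.1 == t))).Nodup :=
      hys_pw.imp (fun h heq => by rw [heq] at h; exact lt_irrefl _ h)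
    have hnz_nd : nonzero.Nodup :=
      hidx.imp (fun h heq => by rw [heq] at h; exact lt_irrefl _ h)
    refine (List.perm_ext_iff_of_nodup hys_nd hnz_nd).2 ?_
    intro x
    constructor
    · intro hx
      obtain ⟨t, _, hxt⟩ := List.mem_flatMap.1 hx
      exact (List.mem_filter.1 hxt).1
    · intro hx
      refine List.mem_flatMap.2 ⟨x.1, ?_, List.mem_filter.2 ⟨hx, by simp⟩⟩
      obtain ⟨hx0, hxp⟩ := hnz_fst x hx
      exact (hts_mem x.1).2 ⟨hx0, List.mem_map.2 ⟨(x.1, x.2.2), hxp, rfl⟩⟩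
  have hsorted2 : PySem.List.sorted2 nonzero (fun x => x.1) (fun x => x.2.1) false
      = ts.flatMap (fun t => nonzero.filter (fun x => x.1 == t)) := by
    rw [pv_sorted2_eq_sorted_lex]
    exact PySem.List.sorted_eq_of_perm_of_pairwise_lt _ _ _ hys_perm
      (pv_ys_pairwise nonzero ts hts_lt hidx)
  -- the non-zero sections agree
  have hsec : pvRuns (PySem.List.sorted2 nonzero (fun x => x.1) (fun x => x.2.1) false)
      = ts.map (fun t => "<b>Topic " ++ PySem.Int.toStr t ++ ": </b>\n" ++
          PySem.Str.join "\n\n" (grouped.getD t [])) := by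
    rw [hsorted2, pv_runs_flatMap nonzero ts hts_lt hbucket_ne]
    refine List.map_congr_left (fun t htmem => ?_)
    have ht0 := ((hts_mem t).1 htmem).1
    rw [hget t, ← pv_bucket t ht0 pairs 0, hnz]
  -- the zero section agrees
  have hzeros : (pairs.filter (fun p => p.1 == 0)).map (fun p => p.2) = grouped.getD 0 [] :=
    (hget 0).symm
  cases h0 : grouped.get? 0 with
  | none =>
      have : grouped.getD 0 [] = [] := PySem.Dict.getD_of_get?_eq_none _ _ h0
      have hz : ((pairs.filter (fun p => p.1 == 0)).map (fun p => p.2)).isEmpty = true := by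
        rw [hzeros, this]; rfl
      simp only [h0, hz, if_pos]
      exact hsec.symm
  | some l =>
      have hl : grouped.getD 0 [] = l := PySem.Dict.getD_of_get?_eq_some _ [] h0
      by_cases he : l.isEmpty
      · have hz : ((pairs.filter (fun p => p.1 == 0)).map (fun p => p.2)).isEmpty = true := by
          rw [hzeros, hl]; exact he
        simp only [h0, he, hz, if_pos]
        exact hsec.symm
      · have hz : ((pairs.filter (fun p => p.1 == 0)).map (fun p => p.2)).isEmpty = false := by
          rw [hzeros, hl]; simp [he]
        simp only [h0, he, hz, Bool.false_eq_true, if_false]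
        rw [hsec, hzeros, hl]

-- ===== VERDICT (by name: the statement is the Claim_ definition above) =====
theorem group_by_topics_spec : Claim_equal_group_by_topics := by
  intro t p _
  exact pv_main t p
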